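-- pv_equiv track=rewrite | github.com/hidagans/SyncaraBot | syncara/modules/ai_learning.py | _analyze_question_patterns
-- ===== SOURCE A (Python) =====
-- from collections import Counter
--
-- def _analyze_question_patterns(conversations):
--     """Analisis tipe pertanyaan yang sering diajukan"""
--     question_types = []
--
--     for conv in conversations:
--         message = conv.get("message", "").lower()
--
--         if any(word in message for word in ["apa", "what"]):
--             question_types.append("information")
--         elif any(word in message for word in ["bagaimana", "how", "cara", "gimana"]):
--             question_types.append("how_to")
--         elif any(word in message for word in ["kenapa", "why", "mengapa"]):
--             question_types.append("explanation")
--         elif any(word in message for word in ["kapan", "when"]):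
--             question_types.append("time")
--         elif any(word in message for word in ["dimana", "where"]):
--             question_types.append("location")
--         elif any(word in message for word in ["siapa", "who"]):
--             question_types.append("person")
--         elif any(word in message for word in ["bisakah", "can", "bisa", "could"]):
--             question_types.append("capability")
--         elif "?" in message:
--             question_types.append("general_question")
--         else:
--             question_types.append("statement")
--
--     return Counter(question_types).most_common()
-- ===== SOURCE B (Python) =====
-- def _analyze_question_patterns(conversations):
--     """Analisis tipe pertanyaan yang sering diajukan"""
--     # Flat priority table, scanned from LOWEST to HIGHEST precedence: the last
--     # matching keyword wins, so no if/elif chain or short-circuit is needed.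
--     keywords = [
--         ("?", 7),
--         ("bisakah", 6), ("can", 6), ("bisa", 6), ("could", 6),
--         ("siapa", 5), ("who", 5),
--         ("dimana", 4), ("where", 4),
--         ("kapan", 3), ("when", 3),
--         ("kenapa", 2), ("why", 2), ("mengapa", 2),
--         ("bagaimana", 1), ("how", 1), ("cara", 1), ("gimana", 1),
--         ("apa", 0), ("what", 0),
--     ]
--     labels = ["information", "how_to", "explanation", "time", "location",
--               "person", "capability", "general_question", "statement"]
--     counts = {}
--     for conv in conversations:
--         message = conv.get("message", "").lower()
--         best = 8
--         for word, priority in keywords: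
--             if word in message:
--                 best = priority
--         label = labels[best]
--         counts[label] = counts.get(label, 0) + 1
--     return sorted(counts.items(), key=lambda kv: kv[1], reverse=True)
-- ===== Notes on version B (the rewrite author's own statement) =====
-- stated objective: alternative
-- what changed: B replaces the first-match if/elif chain plus Counter.most_common with a single fused pass: a flat (keyword, priority) table is scanned from lowest to highest precedence so the last matching keyword wins, the resulting label indexes a fixed label list, counts are accumulated directly into a dict inside the same loop, and the dict items are sorted explicitly by count.
import Mathlib
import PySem

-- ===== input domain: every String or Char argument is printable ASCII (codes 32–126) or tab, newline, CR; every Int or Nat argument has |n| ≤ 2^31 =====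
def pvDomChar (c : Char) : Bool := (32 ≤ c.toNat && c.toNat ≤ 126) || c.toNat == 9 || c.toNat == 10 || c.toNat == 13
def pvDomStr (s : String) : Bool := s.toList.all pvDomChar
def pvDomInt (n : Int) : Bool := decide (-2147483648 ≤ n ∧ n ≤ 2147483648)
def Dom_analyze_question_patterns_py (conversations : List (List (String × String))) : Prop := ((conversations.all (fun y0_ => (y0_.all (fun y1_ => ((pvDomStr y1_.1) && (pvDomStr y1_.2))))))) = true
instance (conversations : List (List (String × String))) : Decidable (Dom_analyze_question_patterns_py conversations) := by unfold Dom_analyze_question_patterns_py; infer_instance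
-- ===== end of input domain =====

-- B fuses classification and counting into one pass and replaces the nine-branch if/elif
-- chain by a flat priority table scanned from lowest to highest precedence (last match
-- wins), counting into a dict directly; same cost (objective: alternative).

-- ===== PORT A =====
-- conv.get("message", ""): first-match lookup in the association list
def pvGetMessage (conv : List (String × String)) : String :=
  ((conv.find? (fun p => p.1 == "message")).map (·.2)).getD ""

def analyze_question_patterns_py (conversations : List (List (String × String))) : List (String × Int) :=
  let question_types := conversations.foldl (fun acc conv =>
    let message := PySem.Str.lower (pvGetMessage conv)
    acc ++ [
      if ["apa", "what"].any (fun word => PySem.Str.isIn word message) then "information"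
      else if ["bagaimana", "how", "cara", "gimana"].any (fun word => PySem.Str.isIn word message) then "how_to"
      else if ["kenapa", "why", "mengapa"].any (fun word => PySem.Str.isIn word message) then "explanation"
      else if ["kapan", "when"].any (fun word => PySem.Str.isIn word message) then "time"
      else if ["dimana", "where"].any (fun word => PySem.Str.isIn word message) then "location"
      else if ["siapa", "who"].any (fun word => PySem.Str.isIn word message) then "person"
      else if ["bisakah", "can", "bisa", "could"].any (fun word => PySem.Str.isIn word message) then "capability"
      else if PySem.Str.isIn "?" message then "general_question"
      else "statement"]) []
  -- Counter(question_types).most_common() = sorted(items, key=count, reverse=True), stable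
  PySem.List.sorted (PySem.Dict.counter question_types).items (fun p => p.2) true

-- ===== PORT B =====
-- flat priority table, LOWEST precedence first: the last matching keyword wins
def pvKeywords : List (String × Int) :=
  [ ("?", 7),
    ("bisakah", 6), ("can", 6), ("bisa", 6), ("could", 6),
    ("siapa", 5), ("who", 5),
    ("dimana", 4), ("where", 4),
    ("kapan", 3), ("when", 3),
    ("kenapa", 2), ("why", 2), ("mengapa", 2),
    ("bagaimana", 1), ("how", 1), ("cara", 1), ("gimana", 1),
    ("apa", 0), ("what", 0) ]

def pvLabels : List String :=
  [ "information", "how_to", "explanation", "time", "location",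
    "person", "capability", "general_question", "statement" ]

def analyze_question_patterns_py_alt (conversations : List (List (String × String))) : List (String × Int) :=
  let counts := conversations.foldl (fun counts conv =>
    let message := PySem.Str.lower (((conv.find? (fun p => p.1 == "message")).map (·.2)).getD "")
    let best := pvKeywords.foldl (fun best wp =>
      if PySem.Str.isIn wp.1 message then wp.2 else best) (8 : Int)
    let label := PySem.List.pyGetD pvLabels best ""
    counts.insert label (counts.getD label 0 + 1)) PySem.Dict.empty
  PySem.List.sorted counts.items (fun kv => kv.2) true

-- ===== PRECONDITION & SPEC =====
def Spec_analyze_question_patterns_py (conversations : List (List (String × String))) (out : List (String × Int)) : Prop := out = analyze_question_patterns_py_alt conversations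
instance (conversations : List (List (String × String))) (out : List (String × Int)) : Decidable (Spec_analyze_question_patterns_py conversations out) := by unfold Spec_analyze_question_patterns_py; infer_instance

-- ===== CLAIM (what is proved, stated in full; the proofs are below) =====
def Claim_equal_analyze_question_patterns_py : Prop := ∀ (conversations : List (List (String × String))), Dom_analyze_question_patterns_py conversations → Spec_analyze_question_patterns_py conversations (analyze_question_patterns_py conversations)

-- ===== LEMMAS AND PROOFS =====

-- B's fused classify-and-count loop builds exactly Counter of the classified list
theorem pv_fused_counter {a : Type} (f : a -> String) (l : List a) :
    l.foldl (fun d x => d.insert (f x) (d.getD (f x) 0 + 1)) PySem.Dict.empty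
    = PySem.Dict.counter (l.map f) := by
  rw [← PySem.Dict.foldl_insert_getD_add_one_eq_counter]
  rw [List.foldl_map]

-- per message: B's last-match-wins scan of the flat priority table, indexed into
-- pvLabels, yields exactly A's first-match if/elif chain
theorem pv_classify_eq (m : String) :
    PySem.List.pyGetD pvLabels
      (pvKeywords.foldl (fun best wp =>
        if PySem.Str.isIn wp.1 m then wp.2 else best) (8 : Int)) ""
    = (if ["apa", "what"].any (fun word => PySem.Str.isIn word m) then "information"
      else if ["bagaimana", "how", "cara", "gimana"].any (fun word => PySem.Str.isIn word m) then "how_to"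
      else if ["kenapa", "why", "mengapa"].any (fun word => PySem.Str.isIn word m) then "explanation"
      else if ["kapan", "when"].any (fun word => PySem.Str.isIn word m) then "time"
      else if ["dimana", "where"].any (fun word => PySem.Str.isIn word m) then "location"
      else if ["siapa", "who"].any (fun word => PySem.Str.isIn word m) then "person"
      else if ["bisakah", "can", "bisa", "could"].any (fun word => PySem.Str.isIn word m) then "capability"
      else if PySem.Str.isIn "?" m then "general_question"
      else "statement") := by
  simp only [pvKeywords, pvLabels, List.foldl, List.any_cons, List.any_nil, Bool.or_false]
  by_cases h1 : PySem.Chars.isIn ['a', 'p', 'a'] m.toList = true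
  · simp [h1]
  by_cases h2 : PySem.Chars.isIn ['w', 'h', 'a', 't'] m.toList = true
  · simp [h1, h2]
  by_cases h3 : PySem.Chars.isIn ['b', 'a', 'g', 'a', 'i', 'm', 'a', 'n', 'a'] m.toList = true
  · simp [h1, h2, h3] ; decide
  by_cases h4 : PySem.Chars.isIn ['h', 'o', 'w'] m.toList = true
  · simp [h1, h2, h3, h4] ; decide
  by_cases h5 : PySem.Chars.isIn ['c', 'a', 'r', 'a'] m.toList = true
  · simp [h1, h2, h3, h4, h5] ; decide
  by_cases h6 : PySem.Chars.isIn ['g', 'i', 'm', 'a', 'n', 'a'] m.toList = true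
  · simp [h1, h2, h3, h4, h5, h6] ; decide
  by_cases h7 : PySem.Chars.isIn ['k', 'e', 'n', 'a', 'p', 'a'] m.toList = true
  · simp [h1, h2, h3, h4, h5, h6, h7] ; decide
  by_cases h8 : PySem.Chars.isIn ['w', 'h', 'y'] m.toList = true
  · simp [h1, h2, h3, h4, h5, h6, h7, h8] ; decide
  by_cases h9 : PySem.Chars.isIn ['m', 'e', 'n', 'g', 'a', 'p', 'a'] m.toList = true
  · simp [h1, h2, h3, h4, h5, h6, h7, h8, h9] ; decide
  by_cases h10 : PySem.Chars.isIn ['k', 'a', 'p', 'a', 'n'] m.toList = true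
  · simp [h1, h2, h3, h4, h5, h6, h7, h8, h9, h10] ; decide
  by_cases h11 : PySem.Chars.isIn ['w', 'h', 'e', 'n'] m.toList = true
  · simp [h1, h2, h3, h4, h5, h6, h7, h8, h9, h10, h11] ; decide
  by_cases h12 : PySem.Chars.isIn ['d', 'i', 'm', 'a', 'n', 'a'] m.toList = true
  · simp [h1, h2, h3, h4, h5, h6, h7, h8, h9, h10, h11, h12] ; decide
  by_cases h13 : PySem.Chars.isIn ['w', 'h', 'e', 'r', 'e'] m.toList = true
  · simp [h1, h2, h3, h4, h5, h6, h7, h8, h9, h10, h11, h12, h13] ; decide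
  by_cases h14 : PySem.Chars.isIn ['s', 'i', 'a', 'p', 'a'] m.toList = true
  · simp [h1, h2, h3, h4, h5, h6, h7, h8, h9, h10, h11, h12, h13, h14] ; decide
  by_cases h15 : PySem.Chars.isIn ['w', 'h', 'o'] m.toList = true
  · simp [h1, h2, h3, h4, h5, h6, h7, h8, h9, h10, h11, h12, h13, h14, h15] ; decide
  by_cases h16 : PySem.Chars.isIn ['b', 'i', 's', 'a', 'k', 'a', 'h'] m.toList = true
  · simp [h1, h2, h3, h4, h5, h6, h7, h8, h9, h10, h11, h12, h13, h14, h15, h16] ; decide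
  by_cases h17 : PySem.Chars.isIn ['c', 'a', 'n'] m.toList = true
  · simp [h1, h2, h3, h4, h5, h6, h7, h8, h9, h10, h11, h12, h13, h14, h15, h16, h17] ; decide
  by_cases h18 : PySem.Chars.isIn ['b', 'i', 's', 'a'] m.toList = true
  · simp [h1, h2, h3, h4, h5, h6, h7, h8, h9, h10, h11, h12, h13, h14, h15, h16, h17, h18] ; decide
  by_cases h19 : PySem.Chars.isIn ['c', 'o', 'u', 'l', 'd'] m.toList = true
  · simp [h1, h2, h3, h4, h5, h6, h7, h8, h9, h10, h11, h12, h13, h14, h15, h16, h17, h18, h19] ; decide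
  by_cases h20 : PySem.Chars.isIn ['?'] m.toList = true
  · simp [h1, h2, h3, h4, h5, h6, h7, h8, h9, h10, h11, h12, h13, h14, h15, h16, h17, h18, h19, h20] ; decide
  simp [h1, h2, h3, h4, h5, h6, h7, h8, h9, h10, h11, h12, h13, h14, h15, h16, h17, h18, h19, h20] ; decide

-- ===== VERDICT (by name: the statement is the Claim_ definition above) =====
theorem analyze_question_patterns_py_spec : Claim_equal_analyze_question_patterns_py := by
  intro conversations _
  unfold Spec_analyze_question_patterns_py analyze_question_patterns_py analyze_question_patterns_py_alt
  rw [PySem.List.foldl_append_singleton_eq_map]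
  simp only [pvGetMessage, pv_classify_eq, List.nil_append]
  rw [pv_fused_counter]
  rfl
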